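-- pv_equiv track=rewrite | github.com/GosiaMarciniak/PythonTRNG | trng.py | mix_bits
-- ===== SOURCE A (Python) =====
-- def mix_bits(input_bits):
--     if(len(input_bits)<3):
--         return input_bits
--
--     mixed_bits = [input_bits[0],input_bits[1]]
--     curentstep=2
--     while(len(mixed_bits)<len(input_bits)):
--         a=len(mixed_bits)-1
--         b=0
--         if(curentstep+a>len(input_bits)):
--             a=len(input_bits)-curentstep
--         for i in range(a):
--             mixed_bits.insert(b*2+1, input_bits[curentstep])
--             b=b+1
--             curentstep=curentstep+1
--
--     return mixed_bits
-- ===== SOURCE B (Python) =====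
-- def mix_bits(input_bits):
--     n = len(input_bits)
--     if n < 3:
--         return input_bits
--     mixed = input_bits[:2]
--     step = 2
--     while step < n:
--         a = min(len(mixed) - 1, n - step)
--         chunk = input_bits[step:step + a]
--         out = []
--         for m, c in zip(mixed, chunk):
--             out.append(m)
--             out.append(c)
--         out.extend(mixed[len(chunk):])
--         mixed = out
--         step += a
--     return mixed
-- ===== Notes on version B (the rewrite author's own statement) =====
-- stated objective: faster
-- what changed: Each round's sequence of positional list.insert calls (each O(len)) is replaced by building the round's list once: zip-interleave the current list with the next input chunk and append the untouched tail.
import Mathlib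
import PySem

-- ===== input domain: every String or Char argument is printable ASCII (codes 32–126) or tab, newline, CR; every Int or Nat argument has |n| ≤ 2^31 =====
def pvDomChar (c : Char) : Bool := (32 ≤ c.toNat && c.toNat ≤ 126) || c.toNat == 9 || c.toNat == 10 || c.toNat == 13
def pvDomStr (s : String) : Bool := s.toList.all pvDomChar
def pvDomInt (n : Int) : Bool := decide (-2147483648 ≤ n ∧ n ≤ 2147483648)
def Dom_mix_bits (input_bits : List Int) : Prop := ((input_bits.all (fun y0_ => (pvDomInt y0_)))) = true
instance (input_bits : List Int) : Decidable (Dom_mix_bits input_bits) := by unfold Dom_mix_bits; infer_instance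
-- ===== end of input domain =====

-- B replaces A's repeated positional list.insert calls with a per-round zip-interleave that
-- rebuilds the list once per round (objective: faster).

-- ===== PORT A =====
-- inner 'for i in range(a)' loop: state (mixed_bits, b, curentstep)
def pvInnerA (input : List Int) : Nat → List Int × Nat × Nat → List Int × Nat × Nat
  | 0, st => st
  | k + 1, (mixed, b, step) =>
      pvInnerA input k
        (PySem.List.insert mixed ((b * 2 + 1 : Nat) : Int) (PySem.List.pyGetD input (step : Int) 0),
         b + 1, step + 1)

-- outer 'while' loop; fuel = len(input_bits), provably sufficient (each round grows mixed_bits)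
def pvOuterA (input : List Int) : Nat → List Int → Nat → List Int
  | 0, mixed, _ => mixed
  | fuel + 1, mixed, step =>
      if mixed.length < input.length then
        let a0 := mixed.length - 1
        let a := if step + a0 > input.length then input.length - step else a0
        let st := pvInnerA input a (mixed, 0, step)
        pvOuterA input fuel st.1 st.2.2
      else mixed

def mix_bits (input_bits : List Int) : List Int :=
  if input_bits.length < 3 then input_bits
  else
    pvOuterA input_bits input_bits.length
      [PySem.List.pyGetD input_bits 0 0, PySem.List.pyGetD input_bits 1 0] 2

-- ===== PORT B =====
-- one round of Source B's while loop body per fuel step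
def pvOuterB (input : List Int) : Nat → List Int → Nat → List Int
  | 0, mixed, _ => mixed
  | fuel + 1, mixed, step =>
      if step < input.length then
        let a := min (mixed.length - 1) (input.length - step)
        let chunk := PySem.List.slice input (some (step : Int)) (some ((step : Int) + (a : Int)))
        let out := (mixed.zip chunk).foldl (fun acc p => acc ++ [p.1, p.2]) [] ++ mixed.drop chunk.length
        pvOuterB input fuel out (step + a)
      else mixed

def mix_bits_alt (input_bits : List Int) : List Int :=
  if input_bits.length < 3 then input_bits
  else pvOuterB input_bits input_bits.length (PySem.List.slice input_bits (some 0) (some 2)) 2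

-- ===== PRECONDITION & SPEC =====
def Spec_mix_bits (input_bits : List Int) (out : List Int) : Prop := out = mix_bits_alt input_bits
instance (input_bits : List Int) (out : List Int) : Decidable (Spec_mix_bits input_bits out) := by unfold Spec_mix_bits; infer_instance

-- ===== CLAIM (what is proved, stated in full; the proofs are below) =====
def Claim_equal_mix_bits : Prop := ∀ (input_bits : List Int), Dom_mix_bits input_bits → Spec_mix_bits input_bits (mix_bits input_bits)

-- ===== LEMMAS AND PROOFS =====

-- interleave ms with cs (cs runs out first): the common shape of one round of both programs
def pvIlv : List Int → List Int → List Int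
  | ms, [] => ms
  | m :: ms, c :: cs => m :: c :: pvIlv ms cs
  | [], _ :: _ => []

lemma pvIlv_length : ∀ (ms cs : List Int), cs.length ≤ ms.length →
    (pvIlv ms cs).length = ms.length + cs.length := by
  intro ms cs
  induction cs generalizing ms with
  | nil => intro _; simp [pvIlv]
  | cons c cs ih =>
      intro h
      cases ms with
      | nil => simp at h
      | cons m ms =>
          simp only [pvIlv, List.length_cons]
          have := ih ms (by simpa using h)
          omega

-- A's inner loop of positional inserts builds acc ++ pvIlv ms chunk
lemma pvInnerA_eq (input : List Int) :
    ∀ (a : Nat) (acc ms : List Int) (b step : Nat),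
      acc.length = 2 * b → a ≤ ms.length → step + a ≤ input.length →
      pvInnerA input a (acc ++ ms, b, step) =
        (acc ++ pvIlv ms ((input.drop step).take a), b + a, step + a) := by
  intro a
  induction a with
  | zero => intro acc ms b step _ _ _; simp [pvInnerA, pvIlv]
  | succ a ih =>
      intro acc ms b step hacc hms hstep
      cases ms with
      | nil => simp at hms
      | cons m ms =>
          have hstep_lt : step < input.length := by omega
          have hget : PySem.List.pyGetD input (step : Int) 0 = input[step] := by
            rw [PySem.List.pyGetD_natCast]
            exact List.getD_eq_getElem _ _ hstep_lt
          have hins : PySem.List.insert (acc ++ m :: ms) ((b * 2 + 1 : Nat) : Int) input[step]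
              = (acc ++ [m, input[step]]) ++ ms := by
            rw [PySem.List.insert_natCast _ _ _ (by simp; omega)]
            rw [show b * 2 + 1 = acc.length + 1 by omega, List.take_append, List.drop_append]
            rw [List.take_of_length_le (by omega), List.drop_eq_nil_of_le (by omega)]
            simp
          simp only [pvInnerA, hget, hins]
          rw [ih (acc ++ [m, input[step]]) ms (b + 1) (step + 1)
              (by simp [hacc]; omega) (by simpa using hms) (by omega)]
          rw [List.drop_eq_getElem_cons hstep_lt, List.take_succ_cons]
          simp only [pvIlv, List.append_assoc, List.cons_append, List.nil_append, Prod.mk.injEq,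
            true_and]
          omega

-- B's zip-interleave round is the same pvIlv
lemma pvZip_eq_ilv : ∀ (cs ms acc : List Int), cs.length ≤ ms.length →
    (ms.zip cs).foldl (fun acc p => acc ++ [p.1, p.2]) acc ++ ms.drop cs.length
      = acc ++ pvIlv ms cs := by
  intro cs
  induction cs with
  | nil => intro ms acc _; simp [pvIlv]
  | cons c cs ih =>
      intro ms acc h
      cases ms with
      | nil => simp at h
      | cons m ms =>
          simp only [List.zip_cons_cons, List.foldl_cons, List.length_cons, List.drop_succ_cons,
            pvIlv]
          rw [ih ms (acc ++ [m, c]) (by simpa using h)]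
          simp

lemma pvOuter_eq (input : List Int) :
    ∀ (fuel : Nat) (mixed : List Int) (step : Nat),
      mixed.length = step → 2 ≤ step →
      pvOuterA input fuel mixed step = pvOuterB input fuel mixed step := by
  intro fuel
  induction fuel with
  | zero => intro mixed step _ _; rfl
  | succ fuel ih =>
      intro mixed step hlen hstep2
      simp only [pvOuterA, pvOuterB, hlen]
      by_cases hc : step < input.length
      · simp only [if_pos hc]
        set n := input.length with hn
        set a := min (step - 1) (n - step) with hadef
        have ha : (if step + (step - 1) > n then n - step else step - 1) = a := by
          rw [hadef]; split_ifs <;> omega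
        have ha1 : a ≤ mixed.length := by rw [hlen]; omega
        have ha2 : step + a ≤ n := by omega
        have hA := pvInnerA_eq input a [] mixed 0 step (by simp) ha1 (by rw [← hn]; omega)
        simp only [List.nil_append, Nat.zero_add] at hA
        rw [ha, hA]
        have hchunk : PySem.List.slice input (some (step : Int)) (some ((step : Int) + (a : Int)))
            = (input.drop step).take a := PySem.List.slice_natCast_add input step a
        rw [hchunk]
        have hclen : ((input.drop step).take a).length = a := by
          simp; omega
        have hz := pvZip_eq_ilv ((input.drop step).take a) mixed []
          (by rw [hclen, hlen]; omega)
        rw [hz, List.nil_append]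
        refine ih _ _ ?_ ?_
        · show (pvIlv mixed ((input.drop step).take a)).length = step + a
          rw [pvIlv_length _ _ (by rw [hclen, hlen]; omega), hclen, hlen]
        · show 2 ≤ step + a
          omega
      · simp only [if_neg hc]

theorem pv_main (input : List Int) : mix_bits input = mix_bits_alt input := by
  unfold mix_bits mix_bits_alt
  by_cases h : input.length < 3
  · simp [h]
  · simp only [if_neg h]
    cases input with
    | nil => exact absurd (by simp) h
    | cons x0 t =>
      cases t with
      | nil => exact absurd (by simp) h
      | cons x1 rest =>
          have h2 : PySem.List.slice (x0 :: x1 :: rest) (some 0) (some 2) = [x0, x1] := by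
            rw [show (0 : Int) = ((0 : Nat) : Int) by rfl,
              show (2 : Int) = ((2 : Nat) : Int) by rfl, PySem.List.slice_natCast]
            rfl
          have hA : ([PySem.List.pyGetD (x0 :: x1 :: rest) 0 0,
              PySem.List.pyGetD (x0 :: x1 :: rest) 1 0] : List Int) = [x0, x1] := by
            simp [pysem]
          rw [h2, hA]
          exact pvOuter_eq _ _ [x0, x1] 2 rfl (by omega)

-- ===== VERDICT (by name: the statement is the Claim_ definition above) =====
theorem mix_bits_spec : Claim_equal_mix_bits := by
  intro input _
  unfold Spec_mix_bits
  exact pv_main input
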